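-- pv_equiv track=rewrite | github.com/rlabarca/purlin | tests/release_checklist_ui/test_release_checklist_ui.py | _assign_orders
-- ===== SOURCE A (Python) =====
-- def _assign_orders(steps):
--     """Assign contiguous 1-based order to enabled steps, None to disabled."""
--     idx = 0
--     for s in steps:
--         if s["enabled"]:
--             idx += 1
--             s["order"] = idx
--         else:
--             s["order"] = None
--     return steps
-- ===== SOURCE B (Python) =====
-- def _assign_orders(steps):
--     """Assign contiguous 1-based order to enabled steps, None to disabled.
--
--     Two-pass decomposition: first build the cumulative count table of
--     enabled flags, then apply it with zip (mutates each dict in place,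
--     returns the same list object)."""
--     flags = [1 if s["enabled"] else 0 for s in steps]
--     cum = []
--     total = 0
--     for f in flags:
--         total += f
--         cum.append(total)
--     for s, c in zip(steps, cum):
--         s["order"] = c if s["enabled"] else None
--     return steps
-- ===== Notes on version B (the rewrite author's own statement) =====
-- stated objective: alternative
-- what changed: Replaces the single inline running-counter loop by a two-pass table decomposition: a prefix-sum table of enabled flags is built first, then orders are applied by zipping steps with the table.
import Mathlib
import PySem

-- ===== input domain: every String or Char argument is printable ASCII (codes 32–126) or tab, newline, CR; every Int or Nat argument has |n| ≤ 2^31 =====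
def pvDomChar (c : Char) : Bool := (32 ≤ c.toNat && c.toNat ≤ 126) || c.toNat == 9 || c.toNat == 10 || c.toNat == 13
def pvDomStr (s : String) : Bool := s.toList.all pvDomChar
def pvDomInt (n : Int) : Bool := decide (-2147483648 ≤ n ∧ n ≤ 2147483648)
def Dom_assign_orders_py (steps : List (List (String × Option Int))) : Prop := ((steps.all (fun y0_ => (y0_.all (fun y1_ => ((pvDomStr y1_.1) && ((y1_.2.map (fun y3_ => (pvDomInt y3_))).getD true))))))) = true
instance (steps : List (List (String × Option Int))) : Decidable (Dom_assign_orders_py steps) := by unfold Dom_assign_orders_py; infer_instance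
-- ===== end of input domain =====

-- B replaces A's inline running counter by two passes (build a prefix-sum table of
-- enabled flags, then apply it by zipping): alternative decomposition, same O(n) cost.
-- Both Pythons mutate the step dicts in place and return the same list object; the
-- equivalence proved here is about the returned value.

-- Python truthiness of a value that is None or an int
def pvTruthy (v : Option Int) : Bool :=
  match v with
  | some n => decide (n ≠ 0)
  | none => false

-- ===== PORT A =====
-- s["enabled"] is exact under Pre_ (the key is present); s["order"] = x is Dict.insert.
def assign_orders_py (steps : List (List (String × Option Int))) : List (List (String × Option Int)) :=
  (steps.foldl (fun (st : Int × List (List (String × Option Int))) s =>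
      let d := PySem.Dict.mk s
      if pvTruthy (d.getD "enabled" none) then
        (st.1 + 1, st.2 ++ [(d.insert "order" (some (st.1 + 1))).items])
      else
        (st.1, st.2 ++ [(d.insert "order" none).items]))
    ((0 : Int), ([] : List (List (String × Option Int))))).2

-- ===== PORT B =====
def assign_orders_py_alt (steps : List (List (String × Option Int))) : List (List (String × Option Int)) :=
  let flags := steps.map (fun s =>
      if pvTruthy ((PySem.Dict.mk s).getD "enabled" none) then (1 : Int) else 0)
  let cum := (flags.foldl (fun (st : Int × List Int) f =>
      (st.1 + f, st.2 ++ [st.1 + f])) ((0 : Int), ([] : List Int))).2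
  (steps.zip cum).map (fun sc =>
      let d := PySem.Dict.mk sc.1
      if pvTruthy (d.getD "enabled" none) then (d.insert "order" (some sc.2)).items
      else (d.insert "order" none).items)

-- ===== PRECONDITION & SPEC =====
-- Pre_ excludes exactly the inputs where Python A raises KeyError: a step dict
-- without the key "enabled" (B raises there too).
def Pre_assign_orders_py (steps : List (List (String × Option Int))) : Prop :=
  (steps.all (fun s => ((PySem.Dict.mk s).get? "enabled").isSome)) = true
instance (steps : List (List (String × Option Int))) : Decidable (Pre_assign_orders_py steps) := by unfold Pre_assign_orders_py; infer_instance

def pvWitness_assign_orders_py : (List (List (String × Option Int))) :=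
  [[("enabled", some 1)], [("enabled", none), ("order", some 7)], [("enabled", some 2)]]

def Spec_assign_orders_py (steps : List (List (String × Option Int))) (out : List (List (String × Option Int))) : Prop := out = assign_orders_py_alt steps
instance (steps : List (List (String × Option Int))) (out : List (List (String × Option Int))) : Decidable (Spec_assign_orders_py steps out) := by unfold Spec_assign_orders_py; infer_instance

-- ===== CLAIM (what is proved, stated in full; the proofs are below) =====
def Claim_equal_assign_orders_py : Prop := ∀ (steps : List (List (String × Option Int))), Dom_assign_orders_py steps → Pre_assign_orders_py steps → Spec_assign_orders_py steps (assign_orders_py steps)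

-- ===== LEMMAS AND PROOFS =====

-- the common reference result, starting from counter value n
def pvGo (n : Int) : List (List (String × Option Int)) → List (List (String × Option Int))
  | [] => []
  | s :: t =>
    let d := PySem.Dict.mk s
    if pvTruthy (d.getD "enabled" none) then
      (d.insert "order" (some (n + 1))).items :: pvGo (n + 1) t
    else
      (d.insert "order" none).items :: pvGo n t

-- prefix sums of flags starting from n
def pvCum (n : Int) : List Int → List Int
  | [] => []
  | f :: t => (n + f) :: pvCum (n + f) t

theorem pvFoldA (steps : List (List (String × Option Int))) :
    ∀ (n : Int) (acc : List (List (String × Option Int))),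
      (steps.foldl (fun (st : Int × List (List (String × Option Int))) s =>
          let d := PySem.Dict.mk s
          if pvTruthy (d.getD "enabled" none) then
            (st.1 + 1, st.2 ++ [(d.insert "order" (some (st.1 + 1))).items])
          else
            (st.1, st.2 ++ [(d.insert "order" none).items])) (n, acc)).2
      = acc ++ pvGo n steps := by
  induction steps with
  | nil => intro n acc; simp [pvGo]
  | cons s t ih =>
    intro n acc
    by_cases h : pvTruthy ((PySem.Dict.mk s).getD "enabled" none) = true
    · simp [pvGo, h, ih]
    · simp only [Bool.not_eq_true] at h
      simp [pvGo, h, ih]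

theorem pvFoldCum (flags : List Int) :
    ∀ (n : Int) (acc : List Int),
      (flags.foldl (fun (st : Int × List Int) f =>
          (st.1 + f, st.2 ++ [st.1 + f])) (n, acc)).2
      = acc ++ pvCum n flags := by
  induction flags with
  | nil => intro n acc; simp [pvCum]
  | cons f t ih => intro n acc; simp [pvCum, ih]

theorem pvZipMap (steps : List (List (String × Option Int))) :
    ∀ (n : Int),
      ((steps.zip (pvCum n (steps.map (fun s =>
          if pvTruthy ((PySem.Dict.mk s).getD "enabled" none) then (1 : Int) else 0)))).map
        (fun sc =>
          let d := PySem.Dict.mk sc.1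
          if pvTruthy (d.getD "enabled" none) then (d.insert "order" (some sc.2)).items
          else (d.insert "order" none).items))
      = pvGo n steps := by
  induction steps with
  | nil => intro n; simp [pvCum, pvGo]
  | cons s t ih =>
    intro n
    by_cases h : pvTruthy ((PySem.Dict.mk s).getD "enabled" none) = true
    · simp [pvCum, pvGo, h, ih]
    · simp only [Bool.not_eq_true] at h
      simp [pvCum, pvGo, h, ih]

-- ===== VERDICT (by name: the statement is the Claim_ definition above) =====
theorem assign_orders_py_spec : Claim_equal_assign_orders_py := by
  intro steps _ _
  show assign_orders_py steps = assign_orders_py_alt steps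
  unfold assign_orders_py assign_orders_py_alt
  simp only [pvFoldA, pvFoldCum, pvZipMap, List.nil_append]
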